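-- pv_equiv track=rewrite | github.com/AsherGlick/Burrito | burrito_converter/integration_tests/run_tests.py | color_unified_diff
-- ===== SOURCE A (Python) =====
-- from typing import List, Optional, Tuple, Dict
--
-- def color_unified_diff(lines: List[str]) -> List[str]:
--     header = True
--     colored_lines: List[str] = []
--     for line in lines:
--         if line[0] == '@':
--             colored_lines.append("\033[36m" + line + "\033[0m")
--             header = False
--         elif header:
--             colored_lines.append("\033[39;1m" + line + "\033[0m")
--         elif line[0] == '-':
--             colored_lines.append("\033[31m" + line + "\033[0m")
--         elif line[0] == '+':
--             colored_lines.append("\033[32m" + line + "\033[0m")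
--         else:
--             colored_lines.append(line)
--     return colored_lines
-- ===== SOURCE B (Python) =====
-- def color_unified_diff(lines):
--     # find boundary: index of first line starting with '@' (len(lines) if none)
--     i = len(lines)
--     for idx, line in enumerate(lines):
--         if line[0] == '@':
--             i = idx
--             break
--     out = ["\033[39;1m" + line + "\033[0m" for line in lines[:i]]
--     if i < len(lines):
--         out.append("\033[36m" + lines[i] + "\033[0m")
--         for line in lines[i + 1:]:
--             c = line[0]
--             if c == '@':
--                 out.append("\033[36m" + line + "\033[0m")
--             elif c == '-':
--                 out.append("\033[31m" + line + "\033[0m")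
--             elif c == '+':
--                 out.append("\033[32m" + line + "\033[0m")
--             else:
--                 out.append(line)
--     return out
-- ===== Notes on version B (the rewrite author's own statement) =====
-- stated objective: alternative
-- what changed: Replaces the single flag-driven pass with a boundary search (index of the first '@' line) followed by region-wise construction: header lines mapped before the boundary, the boundary line wrapped cyan, and a stateless dispatch on the rest.
import Mathlib
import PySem

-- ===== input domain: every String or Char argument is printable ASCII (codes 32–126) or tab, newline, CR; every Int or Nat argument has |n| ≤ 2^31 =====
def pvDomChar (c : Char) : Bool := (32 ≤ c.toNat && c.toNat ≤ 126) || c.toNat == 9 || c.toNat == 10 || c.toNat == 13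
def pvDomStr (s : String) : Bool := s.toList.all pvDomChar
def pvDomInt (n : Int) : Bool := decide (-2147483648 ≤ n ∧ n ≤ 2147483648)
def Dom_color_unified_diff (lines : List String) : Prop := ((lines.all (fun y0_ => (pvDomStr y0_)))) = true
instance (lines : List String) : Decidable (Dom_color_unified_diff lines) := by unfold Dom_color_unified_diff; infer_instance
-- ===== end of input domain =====

-- B replaces A's flag-driven single pass by a boundary-index search plus region-wise construction; same output, same cost.

-- ===== PORT A =====
-- A: one pass with a `header` flag, appending each colored line to an accumulator.
def color_unified_diff (lines : List String) : List String :=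
  (lines.foldl (fun (st : Bool × List String) line =>
      if PySem.Str.pyGet? line 0 = some '@' then
        (false, st.2 ++ ["\x1b[36m" ++ line ++ "\x1b[0m"])
      else if st.1 then
        (st.1, st.2 ++ ["\x1b[39;1m" ++ line ++ "\x1b[0m"])
      else if PySem.Str.pyGet? line 0 = some '-' then
        (st.1, st.2 ++ ["\x1b[31m" ++ line ++ "\x1b[0m"])
      else if PySem.Str.pyGet? line 0 = some '+' then
        (st.1, st.2 ++ ["\x1b[32m" ++ line ++ "\x1b[0m"])
      else
        (st.1, st.2 ++ [line])) (true, [])).2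

-- ===== PORT B =====
-- B's boundary scan: index of the first line whose first char is '@' (length if none).
def pvFindAt (lines : List String) : Nat :=
  match lines with
  | [] => 0
  | l :: ls => if PySem.Str.pyGet? l 0 = some '@' then 0 else 1 + pvFindAt ls

-- B's stateless dispatch for body lines (after the boundary).
def pvBodyColor (line : String) : String :=
  if PySem.Str.pyGet? line 0 = some '@' then "\x1b[36m" ++ line ++ "\x1b[0m"
  else if PySem.Str.pyGet? line 0 = some '-' then "\x1b[31m" ++ line ++ "\x1b[0m"
  else if PySem.Str.pyGet? line 0 = some '+' then "\x1b[32m" ++ line ++ "\x1b[0m"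
  else line

def color_unified_diff_alt (lines : List String) : List String :=
  let i := pvFindAt lines
  let out := (lines.take i).map (fun l => "\x1b[39;1m" ++ l ++ "\x1b[0m")
  match lines.drop i with
  | [] => out
  | l :: rest => out ++ (("\x1b[36m" ++ l ++ "\x1b[0m") :: rest.map pvBodyColor)

-- ===== PRECONDITION & SPEC =====
-- Pre_ excludes inputs containing an empty line: Python A raises IndexError on line[0] there (B raises too).
def Pre_color_unified_diff (lines : List String) : Prop := ∀ l ∈ lines, l ≠ ""
instance (lines : List String) : Decidable (Pre_color_unified_diff lines) := by unfold Pre_color_unified_diff; infer_instance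
def pvWitness_color_unified_diff : List String := ["--- a", "+++ b", "@@ -1 +1 @@", "-x", "+y", " z"]

def Spec_color_unified_diff (lines : List String) (out : List String) : Prop := out = color_unified_diff_alt lines
instance (lines : List String) (out : List String) : Decidable (Spec_color_unified_diff lines out) := by unfold Spec_color_unified_diff; infer_instance

-- ===== CLAIM (what is proved, stated in full; the proofs are below) =====
def Claim_equal_color_unified_diff : Prop := ∀ (lines : List String), Dom_color_unified_diff lines → Pre_color_unified_diff lines → Spec_color_unified_diff lines (color_unified_diff lines)

-- ===== LEMMAS AND PROOFS =====

-- A's loop as a direct recursion (no accumulator), used to reason about the foldl.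
def pvColorRec (lines : List String) (header : Bool) : List String :=
  match lines with
  | [] => []
  | line :: ls =>
    if PySem.Str.pyGet? line 0 = some '@' then
      ("\x1b[36m" ++ line ++ "\x1b[0m") :: pvColorRec ls false
    else if header then
      ("\x1b[39;1m" ++ line ++ "\x1b[0m") :: pvColorRec ls header
    else if PySem.Str.pyGet? line 0 = some '-' then
      ("\x1b[31m" ++ line ++ "\x1b[0m") :: pvColorRec ls header
    else if PySem.Str.pyGet? line 0 = some '+' then
      ("\x1b[32m" ++ line ++ "\x1b[0m") :: pvColorRec ls header
    else
      line :: pvColorRec ls header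

theorem pvFoldl_eq_rec (lines : List String) (h : Bool) (acc : List String) :
    (lines.foldl (fun (st : Bool × List String) line =>
      if PySem.Str.pyGet? line 0 = some '@' then
        (false, st.2 ++ ["\x1b[36m" ++ line ++ "\x1b[0m"])
      else if st.1 then
        (st.1, st.2 ++ ["\x1b[39;1m" ++ line ++ "\x1b[0m"])
      else if PySem.Str.pyGet? line 0 = some '-' then
        (st.1, st.2 ++ ["\x1b[31m" ++ line ++ "\x1b[0m"])
      else if PySem.Str.pyGet? line 0 = some '+' then
        (st.1, st.2 ++ ["\x1b[32m" ++ line ++ "\x1b[0m"])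
      else
        (st.1, st.2 ++ [line])) (h, acc)).2 = acc ++ pvColorRec lines h := by
  induction lines generalizing h acc with
  | nil => simp [pvColorRec]
  | cons line ls ih =>
    simp only [List.foldl_cons, pvColorRec]
    split_ifs with h1 h2 h3 h4 <;> rw [ih] <;> simp

theorem pvColorRec_false (lines : List String) :
    pvColorRec lines false = lines.map pvBodyColor := by
  induction lines with
  | nil => rfl
  | cons line ls ih =>
    simp only [pvColorRec, pvBodyColor, List.map_cons]
    split_ifs <;> simp_all

theorem pvColorRec_true_eq_alt (lines : List String) :
    pvColorRec lines true = color_unified_diff_alt lines := by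
  induction lines with
  | nil => rfl
  | cons line ls ih =>
    by_cases h1 : PySem.Str.pyGet? line 0 = some '@'
    · simp only [pvColorRec, color_unified_diff_alt, pvFindAt, h1]
      simp [pvColorRec_false]
    · simp only [pvColorRec, h1, if_false, if_true]
      rw [ih]
      simp only [color_unified_diff_alt, pvFindAt, h1, ite_false, List.take_succ_cons,
        List.drop_succ_cons, List.map_cons, Nat.add_comm 1]
      cases h : List.drop (pvFindAt ls) ls <;> simp

-- ===== VERDICT (by name: the statement is the Claim_ definition above) =====
theorem color_unified_diff_spec : Claim_equal_color_unified_diff := by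
  intro lines _ _
  unfold Spec_color_unified_diff color_unified_diff
  rw [pvFoldl_eq_rec, pvColorRec_true_eq_alt]
  simp
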